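-- pv_equiv track=rewrite | github.com/dlwlstks96/codingtest | 프로그래머스/롤케이크 자르기.py | solution
-- ===== SOURCE A (Python) =====
-- def solution(topping):
--     answer = 0
--
--     dicA = {} #A가 가지고 있는 토핑
--     dicB = {} #B가 가지고 있는 토핑
--
--     for t in topping: #케이크의 모든 토핑을 우선 B에게 주기
--         if t not in dicB:
--             dicB[t] = 1
--         else:
--             dicB[t] += 1
--
--     lenA = len(dicA) #현재 A의 토핑 종류 수
--     lenB = len(dicB) #현재 B의 토핑 종류 수
--     lenT = len(topping) #전체 롤케이크의 길이
--
--     idxPoint = 0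
--
--     while idxPoint <= lenT - 2:
--
--         nowT = topping[idxPoint] #현재 토핑
--
--         if nowT not in dicA: #현재 토핑을 A가 가지고 있지 않다면
--             dicA[nowT] = 1
--             lenA += 1 #A가 가지고 있는 토핑 종류 수 +1
--
--         dicB[nowT] -= 1 #B에게서 현재 토핑 -1
--         if dicB[nowT] == 0: #B가 현재 토핑을 0개 가지고 있다면
--             lenB -= 1 #B의 토핑 종류 수 -1
--
--         if lenA == lenB: #두 사람의 가지고 있는 토핑 종류 수가 같다면
--             answer += 1
--
--         idxPoint += 1
--
--     return answer
-- ===== SOURCE B (Python) =====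
-- def solution(topping):
--     # Suffix table of distinct-topping counts, then one left-to-right sweep with a set.
--     suffix = []
--     seen = set()
--     for t in reversed(topping):
--         seen.add(t)
--         suffix.append(len(seen))
--     suffix.reverse()  # suffix[i] = number of distinct toppings in topping[i:]
--     left = set()
--     answer = 0
--     for idx in range(len(topping) - 1):
--         left.add(topping[idx])
--         if len(left) == suffix[idx + 1]:
--             answer += 1
--     return answer
-- ===== Notes on version B (the rewrite author's own statement) =====
-- stated objective: alternative
-- what changed: Replaces A's while-loop over two mutable counting dicts (incremental lenA/lenB bookkeeping) with a precomputed suffix table of distinct-topping counts plus a single left set sweep comparing against it.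
import Mathlib
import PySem

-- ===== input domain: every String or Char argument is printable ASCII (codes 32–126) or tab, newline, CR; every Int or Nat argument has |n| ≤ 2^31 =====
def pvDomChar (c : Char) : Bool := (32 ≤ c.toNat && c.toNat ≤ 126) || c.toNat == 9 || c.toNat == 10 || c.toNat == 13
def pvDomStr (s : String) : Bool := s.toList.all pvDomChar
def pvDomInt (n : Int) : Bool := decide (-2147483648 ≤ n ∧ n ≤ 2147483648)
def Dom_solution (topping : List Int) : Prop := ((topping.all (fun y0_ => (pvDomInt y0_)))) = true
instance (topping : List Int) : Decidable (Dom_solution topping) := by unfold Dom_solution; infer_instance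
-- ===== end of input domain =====

-- B replaces A's dual counting-dict while-loop by a precomputed suffix distinct-count table
-- plus a single left-to-right set sweep (objective: alternative decomposition, same O(n) cost).


-- ===== PORT A =====
-- the body of A's first for-loop ("give every topping to B")
def stepI_solution (d : PySem.Dict Int Int) (t : Int) : PySem.Dict Int Int :=
  if d.contains t = false then d.insert t 1 else d.modify t 0 (· + 1)

-- one step of A's while loop (state: answer, dicA, dicB, lenA, lenB); topping[idxPoint]
-- is always in range inside the loop, so pyGetD is exact here
def stepA_solution (topping : List Int)
    (st : Int × PySem.Dict Int Int × PySem.Dict Int Int × Int × Int) (idxPoint : Int) :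
    Int × PySem.Dict Int Int × PySem.Dict Int Int × Int × Int :=
  let (answer, dicA, dicB, lenA, lenB) := st
  let nowT := PySem.List.pyGetD topping idxPoint 0
  let (dicA, lenA) :=
    if dicA.contains nowT = false then (dicA.insert nowT 1, lenA + 1) else (dicA, lenA)
  let dicB := dicB.modify nowT 0 (· - 1)
  let lenB := if dicB.getD nowT 0 = 0 then lenB - 1 else lenB
  let answer := if lenA = lenB then answer + 1 else answer
  (answer, dicA, dicB, lenA, lenB)

def solution (topping : List Int) : Int :=
  let dicB : PySem.Dict Int Int := topping.foldl stepI_solution PySem.Dict.empty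
  let lenA : Int := 0
  let lenB : Int := (PySem.Dict.size dicB : Int)
  let lenT : Int := (topping.length : Int)
  -- while idxPoint <= lenT - 2  ≡  for idxPoint in range(0, lenT - 1)
  let st := (PySem.List.pyRange 0 (lenT - 1) 1).foldl (stepA_solution topping)
    (0, PySem.Dict.empty, dicB, lenA, lenB)
  st.1

-- ===== PORT B =====
-- one step of B's suffix-building pass over reversed(topping)
def stepS_solution (st : PySem.Set Int × List Int) (t : Int) : PySem.Set Int × List Int :=
  let seen := st.1.add t
  (seen, st.2 ++ [(seen.length : Int)])

-- one step of B's left-to-right sweep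
def stepL_solution (topping suffix : List Int) (st : PySem.Set Int × Int) (idx : Int) :
    PySem.Set Int × Int :=
  let left := st.1.add (PySem.List.pyGetD topping idx 0)
  (left, if (left.length : Int) = PySem.List.pyGetD suffix (idx + 1) 0 then st.2 + 1 else st.2)

def solution_alt (topping : List Int) : Int :=
  let p := topping.reverse.foldl stepS_solution (PySem.Set.empty, [])
  let suffix := p.2.reverse
  let q := (PySem.List.pyRange 0 ((topping.length : Int) - 1) 1).foldl
    (stepL_solution topping suffix) (PySem.Set.empty, 0)
  q.2

-- ===== PRECONDITION & SPEC =====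
def Spec_solution (topping : List Int) (out : Int) : Prop := out = solution_alt topping
instance (topping : List Int) (out : Int) : Decidable (Spec_solution topping out) := by
  unfold Spec_solution; infer_instance

-- ===== CLAIM (what is proved, stated in full; the proofs are below) =====
def Claim_equal_solution : Prop := ∀ (topping : List Int), Dom_solution topping → Spec_solution topping (solution topping)

-- ===== LEMMAS AND PROOFS =====

-- distinct-element count of a list, as an Int
def dcount (l : List Int) : Int := (l.toFinset.card : Int)

-- common target both ports are shown to compute: the number of cut positions with
-- equally many distinct toppings on both sides
def targetCount (xs : List Int) : Int :=
  ((List.range (xs.length - 1)).countP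
    (fun k => decide (dcount (xs.take (k + 1)) = dcount (xs.drop (k + 1)))) : Int)

theorem len_ofList_eq_dcount (l : List Int) :
    ((PySem.Set.ofList l).length : Int) = dcount l := by
  have h1 : (PySem.Set.ofList l).toFinset = l.toFinset := by
    ext x; simp [PySem.Set.mem_ofList]
  have h2 := List.toFinset_card_of_nodup (PySem.Set.nodup_ofList (xs := l))
  unfold dcount
  rw [← h1, h2]

theorem dcount_append_singleton (l : List Int) (a : Int) :
    dcount (l ++ [a]) = dcount l + (if a ∈ l then 0 else 1) := by
  unfold dcount
  by_cases h : a ∈ l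
  · simp [h, List.toFinset_append, Finset.insert_eq_self.mpr (List.mem_toFinset.mpr h)]
  · simp only [List.toFinset_append, List.toFinset_cons, List.toFinset_nil,
      insert_empty_eq, Finset.union_singleton]
    rw [Finset.card_insert_of_notMem (by simp [h])]
    simp [h]

theorem dcount_cons (a : Int) (l : List Int) :
    dcount (a :: l) = dcount l + (if a ∈ l then 0 else 1) := by
  unfold dcount
  by_cases h : a ∈ l
  · simp [h, Finset.insert_eq_self.mpr (List.mem_toFinset.mpr h)]
  · simp only [List.toFinset_cons]
    rw [Finset.card_insert_of_notMem (by simp [h])]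
    simp [h]

-- A's first pass builds the multiset of the whole cake: value = count, keys = first occurrences
theorem initB_inv (l : List Int) :
    (∀ x, ((l.foldl stepI_solution PySem.Dict.empty).getD x 0) = (l.count x : Int)) ∧
    (l.foldl stepI_solution PySem.Dict.empty).keys = PySem.Set.ofList l := by
  induction l using List.reverseRecOn with
  | nil => simp [PySem.Dict.getD_empty, PySem.Dict.keys_empty, PySem.Set.ofList_nil]
  | append_singleton l t ih =>
    obtain ⟨ihv, ihk⟩ := ih
    rw [List.foldl_append]
    set d := l.foldl stepI_solution PySem.Dict.empty with hd
    simp only [List.foldl_cons, List.foldl_nil]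
    unfold stepI_solution
    have hct : d.contains t = true ↔ t ∈ l := by
      rw [PySem.Dict.contains_iff_mem_keys, ihk, PySem.Set.mem_ofList]
    by_cases hmem : t ∈ l
    · have hc : d.contains t = true := hct.mpr hmem
      rw [if_neg (by simp [hc])]
      constructor
      · intro x
        rw [PySem.Dict.getD_modify]
        by_cases hx : x = t
        · subst hx; simp [ihv, List.count_append]
        · simp [hx, ihv, List.count_append, Ne.symm hx]
      · rw [PySem.Dict.keys_modify, PySem.Dict.keys_insert_of_contains _ _ hc, ihk,
          PySem.Set.ofList_append_singleton,
          PySem.Set.add_of_mem (by rw [PySem.Set.mem_ofList]; exact hmem)]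
    · have hc : d.contains t = false := by
        cases h' : d.contains t
        · rfl
        · exact absurd (hct.mp h') hmem
      rw [if_pos (by simp [hc])]
      constructor
      · intro x
        rw [PySem.Dict.getD_insert]
        by_cases hx : x = t
        · subst hx
          simp [List.count_append, List.count_eq_zero.mpr hmem]
        · simp [hx, ihv, List.count_append, Ne.symm hx]
      · rw [PySem.Dict.keys_insert_of_not_contains _ _ hc, ihk,
          PySem.Set.ofList_append_singleton,
          PySem.Set.add_of_not_mem (by rw [PySem.Set.mem_ofList]; exact hmem)]

-- one iteration of A's while loop, evaluated against the invariant
theorem stepA_eval (xs : List Int) (m : ℕ) (hmn : m < xs.length)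
    (cA : Int) (dA dB : PySem.Dict Int Int)
    (hA : ∀ x, dA.contains x = true ↔ x ∈ xs.take m)
    (hB : ∀ x, dB.getD x 0 = ((xs.drop m).count x : Int)) :
    ∃ dA' dB',
      stepA_solution xs (cA, dA, dB, dcount (xs.take m), dcount (xs.drop m)) (m : Int)
        = (cA + (if dcount (xs.take (m + 1)) = dcount (xs.drop (m + 1)) then 1 else 0),
           dA', dB', dcount (xs.take (m + 1)), dcount (xs.drop (m + 1))) ∧
      (∀ x, dA'.contains x = true ↔ x ∈ xs.take (m + 1)) ∧
      (∀ x, dB'.getD x 0 = ((xs.drop (m + 1)).count x : Int)) := by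
  have hget : PySem.List.pyGetD xs (m : Int) 0 = xs[m] := by
    rw [PySem.List.pyGetD_eq_getElem xs 0 (by positivity) (by exact_mod_cast hmn)]
    simp
  have htake : xs.take (m + 1) = xs.take m ++ [xs[m]] := by
    rw [List.take_add_one]; simp [List.getElem?_eq_getElem hmn]
  have hdrop : xs.drop m = xs[m] :: xs.drop (m + 1) := List.drop_eq_getElem_cons hmn
  have hcnt : (xs.drop m).count xs[m] = (xs.drop (m + 1)).count xs[m] + 1 := by
    rw [hdrop, List.count_cons_self]
  have hmodget : (dB.modify xs[m] 0 (· - 1)).getD xs[m] 0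
      = ((xs.drop (m + 1)).count xs[m] : Int) := by
    rw [PySem.Dict.getD_modify_self, hB, hcnt]; push_cast; ring
  have hB' : ∀ x, (dB.modify xs[m] 0 (· - 1)).getD x 0 = ((xs.drop (m + 1)).count x : Int) := by
    intro x
    by_cases hx : x = xs[m]
    · subst hx; exact hmodget
    · rw [PySem.Dict.getD_modify, if_neg hx, hB, hdrop, List.count_cons]
      simp [Ne.symm hx]
  have hlenB : (if (dB.modify xs[m] 0 (· - 1)).getD xs[m] 0 = 0
      then dcount (xs.drop m) - 1 else dcount (xs.drop m)) = dcount (xs.drop (m + 1)) := by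
    rw [hmodget]
    have hdc : dcount (xs.drop m)
        = dcount (xs.drop (m + 1)) + (if xs[m] ∈ xs.drop (m + 1) then 0 else 1) := by
      rw [hdrop, dcount_cons]
    by_cases hmem : xs[m] ∈ xs.drop (m + 1)
    · have hpos : 0 < (xs.drop (m + 1)).count xs[m] := List.count_pos_iff.mpr hmem
      rw [if_neg (by exact_mod_cast hpos.ne'), hdc, if_pos hmem]
      ring
    · rw [if_pos (by exact_mod_cast List.count_eq_zero.mpr hmem), hdc, if_neg hmem]
      ring
  by_cases hmemA : xs[m] ∈ xs.take m
  · have hcA : dA.contains xs[m] = true := (hA _).mpr hmemA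
    have hlenA : dcount (xs.take (m + 1)) = dcount (xs.take m) := by
      rw [htake, dcount_append_singleton, if_pos hmemA]; ring
    refine ⟨dA, dB.modify xs[m] 0 (· - 1), ?_, ?_, hB'⟩
    · unfold stepA_solution
      simp only [hget, hcA, Bool.true_eq_false, if_false, hlenB, hlenA]
      split_ifs <;> simp
    · intro x; rw [htake]
      simp only [List.mem_append, List.mem_singleton, hA x]
      constructor
      · exact Or.inl
      · rintro (h | rfl)
        · exact h
        · exact hmemA
  · have hcA : dA.contains xs[m] = false := by
      cases h' : dA.contains xs[m]
      · rfl
      · exact absurd ((hA _).mp h') hmemA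
    have hlenA : dcount (xs.take (m + 1)) = dcount (xs.take m) + 1 := by
      rw [htake, dcount_append_singleton, if_neg hmemA]
    refine ⟨dA.insert xs[m] 1, dB.modify xs[m] 0 (· - 1), ?_, ?_, hB'⟩
    · unfold stepA_solution
      simp only [hget, hcA, if_true, hlenB]
      rw [hlenA]
      split_ifs <;> simp
    · intro x; rw [htake]
      rw [PySem.Dict.contains_insert]
      simp only [List.mem_append, List.mem_singleton, Bool.or_eq_true, beq_iff_eq, hA x]
      tauto

-- invariant of A's while loop after m iterations
theorem A_loop (xs : List Int) (m : ℕ) (hm : m ≤ xs.length - 1) :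
    ∃ dA dB,
      ((List.range m).map (fun (k : ℕ) => (k : Int))).foldl (stepA_solution xs)
          (0, PySem.Dict.empty,
            xs.foldl stepI_solution PySem.Dict.empty, 0, dcount xs)
        = ((((List.range m).countP
              (fun k => decide (dcount (xs.take (k + 1)) = dcount (xs.drop (k + 1))))) : Int),
           dA, dB, dcount (xs.take m), dcount (xs.drop m)) ∧
      (∀ x, dA.contains x = true ↔ x ∈ xs.take m) ∧
      (∀ x, dB.getD x 0 = ((xs.drop m).count x : Int)) := by
  induction m with
  | zero =>
    refine ⟨PySem.Dict.empty,
      xs.foldl stepI_solution PySem.Dict.empty, ?_, ?_, ?_⟩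
    · simp [dcount]
    · intro x; simp [PySem.Dict.contains_empty]
    · intro x; simpa using (initB_inv xs).1 x
  | succ m ih =>
    have hm' : m ≤ xs.length - 1 := by omega
    have hmn : m < xs.length := by omega
    obtain ⟨dA, dB, heq, hA, hB⟩ := ih hm'
    obtain ⟨dA', dB', hstep, hA', hB'⟩ := stepA_eval xs m hmn _ dA dB hA hB
    refine ⟨dA', dB', ?_, hA', hB'⟩
    have hfold : ((List.range (m + 1)).map (fun (k : ℕ) => (k : Int))).foldl (stepA_solution xs)
          (0, PySem.Dict.empty,
            xs.foldl stepI_solution PySem.Dict.empty, 0, dcount xs)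
        = stepA_solution xs
            (((List.range m).map (fun (k : ℕ) => (k : Int))).foldl (stepA_solution xs)
              (0, PySem.Dict.empty,
                xs.foldl stepI_solution PySem.Dict.empty, 0, dcount xs)) (m : Int) := by
      rw [List.range_succ, List.map_append, List.foldl_append]
      simp
    rw [hfold, heq, hstep]
    have hcnt : (((List.range (m + 1)).countP
          (fun k => decide (dcount (xs.take (k + 1)) = dcount (xs.drop (k + 1))))) : Int)
        = (((List.range m).countP
              (fun k => decide (dcount (xs.take (k + 1)) = dcount (xs.drop (k + 1))))) : Int)
          + (if dcount (xs.take (m + 1)) = dcount (xs.drop (m + 1)) then 1 else 0) := by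
      rw [List.range_succ, List.countP_append]
      push_cast
      simp [List.countP_cons]
    rw [hcnt]

theorem solution_eq_target (xs : List Int) : solution xs = targetCount xs := by
  have hrange : PySem.List.pyRange 0 ((xs.length : Int) - 1) 1
      = (List.range (xs.length - 1)).map (fun (k : ℕ) => (k : Int)) := by
    rw [PySem.List.pyRange_one]
    have ht : (((xs.length : Int) - 1) - 0).toNat = xs.length - 1 := by omega
    rw [ht]
    simp
  have hsize : ((PySem.Dict.size
      (xs.foldl stepI_solution PySem.Dict.empty) : ℕ) : Int) = dcount xs := by
    have hk := (initB_inv xs).2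
    have hks : (xs.foldl stepI_solution PySem.Dict.empty).keys.length = PySem.Dict.size
      (xs.foldl stepI_solution PySem.Dict.empty) := by
      simp [PySem.Dict.keys, PySem.Dict.size]
    rw [← hks, hk]
    exact len_ofList_eq_dcount xs
  obtain ⟨dA, dB, heq, _, _⟩ := A_loop xs (xs.length - 1) le_rfl
  unfold solution
  dsimp only
  rw [hrange, hsize, heq]
  rfl

-- B's suffix-building pass over the reversed list, in closed form
theorem S_fold (ys : List Int) :
    ys.foldl stepS_solution (PySem.Set.empty, [])
      = (PySem.Set.ofList ys,
         (List.range ys.length).map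
           (fun k => ((PySem.Set.ofList (ys.take (k + 1))).length : Int))) := by
  induction ys using List.reverseRecOn with
  | nil => rfl
  | append_singleton ys t ih =>
    rw [List.foldl_append, ih]
    simp only [List.foldl_cons, List.foldl_nil]
    unfold stepS_solution
    rw [← PySem.Set.ofList_append_singleton]
    simp only [Prod.mk.injEq]
    refine ⟨trivial, ?_⟩
    rw [List.length_append, List.length_singleton, List.range_succ, List.map_append]
    congr 1
    · apply List.map_congr_left
      intro k hk
      rw [List.mem_range] at hk
      rw [List.take_append_of_le_length (by omega)]
    · simp only [List.map_cons, List.map_nil]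
      rw [List.take_of_length_le (by simp)]

theorem suffix_get (xs : List Int) (j : ℕ) (hj : j < xs.length) :
    PySem.List.pyGetD (((xs.reverse.foldl stepS_solution (PySem.Set.empty, [])).2).reverse)
      (j : Int) 0 = dcount (xs.drop j) := by
  rw [S_fold, PySem.List.pyGetD_natCast]
  rw [List.getD_eq_getElem _ _ (by simpa using hj)]
  rw [List.getElem_reverse]
  simp only [List.getElem_map, List.getElem_range, List.length_map, List.length_range,
    List.length_reverse]
  rw [len_ofList_eq_dcount]
  have h1 : xs.length - 1 - j + 1 = xs.length - j := by omega
  rw [h1, List.take_reverse]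
  have h2 : xs.length - (xs.length - j) = j := by omega
  rw [h2]
  unfold dcount
  rw [List.toFinset_reverse]

-- invariant of B's sweep after m iterations
theorem B_loop (xs suffix : List Int)
    (hs : ∀ j : ℕ, j < xs.length → PySem.List.pyGetD suffix (j : Int) 0 = dcount (xs.drop j))
    (m : ℕ) (hm : m ≤ xs.length - 1) :
    ((List.range m).map (fun (k : ℕ) => (k : Int))).foldl (stepL_solution xs suffix)
        (PySem.Set.empty, 0)
      = (PySem.Set.ofList (xs.take m),
         (((List.range m).countP
            (fun k => decide (dcount (xs.take (k + 1)) = dcount (xs.drop (k + 1))))) : Int)) := by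
  induction m with
  | zero => rfl
  | succ m ih =>
    have hm' : m ≤ xs.length - 1 := by omega
    have hmn : m < xs.length := by omega
    have hm1 : m + 1 < xs.length := by omega
    rw [List.range_succ, List.map_append, List.foldl_append, ih hm']
    simp only [List.map_cons, List.map_nil, List.foldl_cons, List.foldl_nil]
    unfold stepL_solution
    have hget : PySem.List.pyGetD xs (m : Int) 0 = xs[m] := by
      rw [PySem.List.pyGetD_eq_getElem xs 0 (by positivity) (by exact_mod_cast hmn)]
      simp
    have htake : xs.take (m + 1) = xs.take m ++ [xs[m]] := by
      rw [List.take_add_one]; simp [List.getElem?_eq_getElem hmn]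
    have hidx : ((m : Int) + 1) = ((m + 1 : ℕ) : Int) := by push_cast; ring
    rw [hget, ← PySem.Set.ofList_append_singleton, ← htake, hidx, hs (m + 1) hm1]
    simp only [Prod.mk.injEq]
    refine ⟨trivial, ?_⟩
    rw [len_ofList_eq_dcount, List.countP_append]
    push_cast
    simp only [List.countP_cons, List.countP_nil, decide_eq_true_eq]
    split_ifs <;> push_cast <;> ring

theorem solution_alt_eq_target (xs : List Int) : solution_alt xs = targetCount xs := by
  have hrange : PySem.List.pyRange 0 ((xs.length : Int) - 1) 1
      = (List.range (xs.length - 1)).map (fun (k : ℕ) => (k : Int)) := by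
    rw [PySem.List.pyRange_one]
    have ht : (((xs.length : Int) - 1) - 0).toNat = xs.length - 1 := by omega
    rw [ht]
    simp
  unfold solution_alt
  dsimp only
  rw [hrange]
  rw [B_loop xs _ (fun j hj => suffix_get xs j hj) (xs.length - 1) le_rfl]
  rfl

-- ===== VERDICT (by name: the statement is the Claim_ definition above) =====
theorem solution_spec : Claim_equal_solution := by
  intro topping _
  unfold Spec_solution
  rw [solution_eq_target, solution_alt_eq_target]
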